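-- pv_equiv track=rewrite | github.com/boowerk/CodingTest-Pratice | 2026Algorithm/프로그래머스/프로그래머스 체육복.py | solution
-- ===== SOURCE A (Python) =====
-- def solution(n, lost, reserve):
--     lost_set = set(lost)
--     reserve_set = set(reserve)
--
--     # 여벌이 있지만 도난당한 학생은 스스로 해결하므로 양쪽 집합에서 제거한다.
--     both = lost_set & reserve_set
--     lost_set -= both
--     reserve_set -= both
--
--     for student in sorted(lost_set):
--         # 앞번호 학생부터 빌릴 수 있으면 먼저 사용하고, 없으면 뒷번호를 확인한다.
--         if student - 1 in reserve_set:
--             reserve_set.remove(student - 1)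
--         elif student + 1 in reserve_set:
--             reserve_set.remove(student + 1)
--         else:
--             n -= 1
--
--     return n
-- ===== SOURCE B (Python) =====
-- def solution(n, lost, reserve):
--     # Two-pointer greedy over the two sorted (deduped, self-resolved removed) lists.
--     lost_only = sorted(set(lost) - set(reserve))
--     reserve_only = sorted(set(reserve) - set(lost))
--     j = 0
--     ans = n
--     for s in lost_only:
--         while j < len(reserve_only) and reserve_only[j] < s - 1:
--             j += 1
--         if j < len(reserve_only) and reserve_only[j] <= s + 1:
--             j += 1
--         else:
--             ans -= 1
--     return ans
-- ===== Notes on version B (the rewrite author's own statement) =====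
-- stated objective: alternative
-- what changed: Replaces A's per-student set membership tests and removals with a single two-pointer merge sweep over the two sorted deduped lists (no mutable set, no lookups in the loop).
import Mathlib
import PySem

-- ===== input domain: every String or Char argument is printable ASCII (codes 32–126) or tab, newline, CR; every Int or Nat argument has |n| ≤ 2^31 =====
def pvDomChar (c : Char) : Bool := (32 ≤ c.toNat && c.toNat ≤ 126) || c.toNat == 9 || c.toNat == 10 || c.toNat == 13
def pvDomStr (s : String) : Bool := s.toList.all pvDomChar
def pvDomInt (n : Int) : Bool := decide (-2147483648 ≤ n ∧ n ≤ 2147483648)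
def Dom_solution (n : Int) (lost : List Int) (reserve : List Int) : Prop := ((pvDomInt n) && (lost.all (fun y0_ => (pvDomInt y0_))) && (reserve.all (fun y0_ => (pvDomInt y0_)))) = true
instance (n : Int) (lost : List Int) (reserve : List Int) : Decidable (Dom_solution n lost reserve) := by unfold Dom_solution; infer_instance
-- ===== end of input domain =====

-- B replaces A's per-student set membership tests/removals with a two-pointer merge
-- sweep over the two sorted deduped lists (objective: alternative algorithm, same cost).

-- ===== PORT A =====
-- A's loop body: state (reserve_set, n); 'reserve_set.remove(x)' is guarded by membership,
-- so 'remove?' never raises and '(remove? …).getD rs' is exact.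
def solutionStep (st : PySem.Set Int × Int) (student : Int) : PySem.Set Int × Int :=
  if PySem.Set.contains st.1 (student - 1) then
    ((PySem.Set.remove? st.1 (student - 1)).getD st.1, st.2)
  else if PySem.Set.contains st.1 (student + 1) then
    ((PySem.Set.remove? st.1 (student + 1)).getD st.1, st.2)
  else (st.1, st.2 - 1)

def solution (n : Int) (lost : List Int) (reserve : List Int) : Int :=
  let lostSet := PySem.Set.ofList lost
  let reserveSet := PySem.Set.ofList reserve
  let both := PySem.Set.inter lostSet reserveSet
  let lostSet := PySem.Set.diff lostSet both
  let reserveSet := PySem.Set.diff reserveSet both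
  ((PySem.List.sorted lostSet (fun x => x) false).foldl solutionStep (reserveSet, n)).2

-- ===== PORT B =====
-- the inner 'while j < len(R) and R[j] < s - 1: j += 1' (advancing the pointer = dropping heads)
def altSkip (R : List Int) (b : Int) : List Int :=
  match R with
  | [] => []
  | r :: rest => if r < b then altSkip rest b else r :: rest

-- the 'for s in lost_only' loop, state (unconsumed reserve suffix, ans)
def altGo (L : List Int) (R : List Int) (ans : Int) : Int :=
  match L with
  | [] => ans
  | s :: L' =>
    match altSkip R (s - 1) with
    | r :: rest => if r ≤ s + 1 then altGo L' rest ans else altGo L' (r :: rest) (ans - 1)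
    | [] => altGo L' [] (ans - 1)

def solution_alt (n : Int) (lost : List Int) (reserve : List Int) : Int :=
  let lostOnly := PySem.List.sorted (PySem.Set.diff (PySem.Set.ofList lost) (PySem.Set.ofList reserve)) (fun x => x) false
  let reserveOnly := PySem.List.sorted (PySem.Set.diff (PySem.Set.ofList reserve) (PySem.Set.ofList lost)) (fun x => x) false
  altGo lostOnly reserveOnly n

-- ===== PRECONDITION & SPEC =====
def Spec_solution (n : Int) (lost : List Int) (reserve : List Int) (out : Int) : Prop := out = solution_alt n lost reserve
instance (n : Int) (lost : List Int) (reserve : List Int) (out : Int) : Decidable (Spec_solution n lost reserve out) := by unfold Spec_solution; infer_instance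

-- ===== CLAIM (what is proved, stated in full; the proofs are below) =====
def Claim_equal_solution : Prop := ∀ (n : Int) (lost : List Int) (reserve : List Int), Dom_solution n lost reserve → Spec_solution n lost reserve (solution n lost reserve)

-- ===== LEMMAS AND PROOFS =====

theorem pairwise_lt_of_le_nodup (l : List Int) (h : l.Pairwise (· ≤ ·)) (hn : l.Nodup) :
    l.Pairwise (· < ·) := by
  have := h.and hn
  exact this.imp (fun h => lt_of_le_of_ne h.1 h.2)

theorem altSkip_mem (R : List Int) (b : Int) (hR : R.Pairwise (· < ·)) :
    (∀ x, x ∈ altSkip R b ↔ x ∈ R ∧ b ≤ x) ∧ (altSkip R b).Pairwise (· < ·) := by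
  induction R with
  | nil => simp [altSkip]
  | cons r rest ih =>
    rcases List.pairwise_cons.mp hR with ⟨hr, hrest⟩
    by_cases hlt : r < b
    · have := ih hrest
      simp only [altSkip, if_pos hlt]
      refine ⟨fun x => ?_, this.2⟩
      rw [(this.1 x)]
      simp only [List.mem_cons]
      constructor
      · rintro ⟨hx, hb⟩; exact ⟨Or.inr hx, hb⟩
      · rintro ⟨hx | hx, hb⟩
        · omega
        · exact ⟨hx, hb⟩
    · simp only [altSkip, if_neg hlt]
      refine ⟨fun x => ?_, hR⟩
      constructor
      · intro hx
        rcases List.mem_cons.mp hx with h | h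
        · subst h; exact ⟨hx, by omega⟩
        · exact ⟨hx, by have := hr x h; omega⟩
      · exact fun h => h.1

theorem altGo_cons_nil (s : Int) (L' R : List Int) (ans : Int)
    (h : altSkip R (s - 1) = []) : altGo (s :: L') R ans = altGo L' [] (ans - 1) := by
  rw [altGo, h]

theorem altGo_cons_cons (s : Int) (L' R : List Int) (ans r : Int) (rest : List Int)
    (h : altSkip R (s - 1) = r :: rest) :
    altGo (s :: L') R ans = if r ≤ s + 1 then altGo L' rest ans else altGo L' (r :: rest) (ans - 1) := by
  rw [altGo, h]

-- main invariant lemma: A's fold over the sorted lost-only list with a reserve SET equals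
-- B's two-pointer sweep with the sorted reserve-only suffix R, given
--  h1 : R's members are in S,  h2 : members of S outside R sit below every l-1 for l ∈ L,
--  h3 : no l ∈ L is in S.
theorem main_inv (L : List Int) : ∀ (R : List Int) (S : PySem.Set Int) (n : Int),
    L.Pairwise (· < ·) → R.Pairwise (· < ·) →
    (∀ x ∈ R, x ∈ S) →
    (∀ x ∈ S, x ∉ R → ∀ l ∈ L, x < l - 1) →
    (∀ l ∈ L, l ∉ S) →
    (L.foldl solutionStep (S, n)).2 = altGo L R n := by
  induction L with
  | nil => intro R S n _ _ _ _ _; simp [altGo]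
  | cons s L' ih =>
    intro R S n hL hR h1 h2 h3
    rcases List.pairwise_cons.mp hL with ⟨hsL, hL'⟩
    have hskip := altSkip_mem R (s - 1) hR
    have hm1 : ((s - 1) ∈ S) ↔ ((s - 1) ∈ R) := by
      constructor
      · intro hx
        by_contra hnr
        have := h2 _ hx hnr s (List.mem_cons_self)
        omega
      · exact h1 _
    have hm2 : ((s + 1) ∈ S) ↔ ((s + 1) ∈ R) := by
      constructor
      · intro hx
        by_contra hnr
        have := h2 _ hx hnr s (List.mem_cons_self)
        omega
      · exact h1 _
    have hdrop : ∀ x ∈ S, x ∉ altSkip R (s - 1) → ∀ l ∈ L', x < l - 1 := by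
      intro x hxS hxR' l hl
      have hsl : s < l := hsL l hl
      by_cases hxR : x ∈ R
      · have : ¬ (s - 1 ≤ x) := fun h => hxR' ((hskip.1 x).2 ⟨hxR, h⟩)
        omega
      · have := h2 x hxS hxR l (List.mem_cons_of_mem _ hl)
        omega
    have h3' : ∀ l ∈ L', l ∉ S := fun l hl => h3 l (List.mem_cons_of_mem _ hl)
    simp only [List.foldl_cons]
    rcases hrs : altSkip R (s - 1) with _ | ⟨r, rest⟩
    · -- every reserve element is below s-1: neither s-1 nor s+1 available
      have h1n : (s - 1) ∉ S := by
        intro h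
        have : (s - 1) ∈ altSkip R (s - 1) := (hskip.1 _).2 ⟨hm1.mp h, le_refl _⟩
        rw [hrs] at this; simp at this
      have h2n : (s + 1) ∉ S := by
        intro h
        have : (s + 1) ∈ altSkip R (s - 1) := (hskip.1 _).2 ⟨hm2.mp h, by omega⟩
        rw [hrs] at this; simp at this
      have hstep : solutionStep (S, n) s = (S, n - 1) := by
        simp [solutionStep, h1n, h2n]
      rw [hstep, altGo_cons_nil s L' R n hrs]
      exact ih [] S (n - 1) hL' (List.Pairwise.nil) (by simp) (fun x hx _ => hdrop x hx (by rw [hrs]; simp)) h3'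
    · have hR' : (r :: rest).Pairwise (· < ·) := hrs ▸ hskip.2
      have hrmem : r ∈ R ∧ s - 1 ≤ r := (hskip.1 r).1 (by rw [hrs]; exact List.mem_cons_self)
      have hrS : r ∈ S := h1 r hrmem.1
      have hrne : r ≠ s := fun h => h3 s List.mem_cons_self (h ▸ hrS)
      have hrestR : ∀ x ∈ rest, x ∈ R ∧ r < x := by
        intro x hx
        refine ⟨((hskip.1 x).1 (by rw [hrs]; exact List.mem_cons_of_mem _ hx)).1, ?_⟩
        exact (List.pairwise_cons.mp hR').1 x hx
      have hnotR' : ∀ x ∈ S, x ∉ (r :: rest) → ∀ l ∈ L', x < l - 1 := by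
        intro x hx hxr
        exact hdrop x hx (by rw [hrs]; exact hxr)
      by_cases hr1 : r = s - 1
      · -- borrow from student s-1
        have hs1S : (s - 1) ∈ S := hr1 ▸ hrS
        have hstep : solutionStep (S, n) s = (PySem.Set.discard S (s - 1), n) := by
          simp [solutionStep, hs1S, PySem.Set.remove?_of_mem hs1S]
        rw [hstep, altGo_cons_cons s L' R n r rest hrs, if_pos (by omega : r ≤ s + 1)]
        refine ih rest _ n hL' (List.pairwise_cons.mp hR').2 ?_ ?_ ?_
        · intro x hx
          rcases hrestR x hx with ⟨hxR, hrx⟩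
          exact (PySem.Set.mem_discard _ _ _).2 ⟨h1 x hxR, by omega⟩
        · intro x hx hxrest l hl
          rcases (PySem.Set.mem_discard _ _ _).1 hx with ⟨hxS, hxne⟩
          refine hnotR' x hxS ?_ l hl
          intro hmem
          rcases List.mem_cons.mp hmem with h | h
          · exact hxne (by omega)
          · exact hxrest h
        · intro l hl hmem
          exact h3' l hl ((PySem.Set.mem_discard _ _ _).1 hmem).1
      · have h1n : (s - 1) ∉ S := by
          intro h
          have : (s - 1) ∈ altSkip R (s - 1) := (hskip.1 _).2 ⟨hm1.mp h, le_refl _⟩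
          rw [hrs] at this
          rcases List.mem_cons.mp this with h' | h'
          · exact hr1 h'.symm
          · have := (hrestR _ h').2; omega
        by_cases hr2 : r = s + 1
        · -- borrow from student s+1
          have hs2S : (s + 1) ∈ S := hr2 ▸ hrS
          have hstep : solutionStep (S, n) s = (PySem.Set.discard S (s + 1), n) := by
            simp [solutionStep, h1n, hs2S, PySem.Set.remove?_of_mem hs2S]
          rw [hstep, altGo_cons_cons s L' R n r rest hrs, if_pos (by omega : r ≤ s + 1)]
          refine ih rest _ n hL' (List.pairwise_cons.mp hR').2 ?_ ?_ ?_
          · intro x hx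
            rcases hrestR x hx with ⟨hxR, hrx⟩
            exact (PySem.Set.mem_discard _ _ _).2 ⟨h1 x hxR, by omega⟩
          · intro x hx hxrest l hl
            rcases (PySem.Set.mem_discard _ _ _).1 hx with ⟨hxS, hxne⟩
            refine hnotR' x hxS ?_ l hl
            intro hmem
            rcases List.mem_cons.mp hmem with h | h
            · exact hxne (by omega)
            · exact hxrest h
          · intro l hl hmem
            exact h3' l hl ((PySem.Set.mem_discard _ _ _).1 hmem).1
        · -- head of the remaining reserve is beyond s+1: nobody lends to s
          have hrgt : s + 1 < r := by
            rcases hrmem with ⟨_, hge⟩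
            omega
          have h2n : (s + 1) ∉ S := by
            intro h
            have : (s + 1) ∈ altSkip R (s - 1) := (hskip.1 _).2 ⟨hm2.mp h, by omega⟩
            rw [hrs] at this
            rcases List.mem_cons.mp this with h' | h'
            · omega
            · have := (hrestR _ h').2; omega
          have hstep : solutionStep (S, n) s = (S, n - 1) := by
            simp [solutionStep, h1n, h2n]
          rw [hstep, altGo_cons_cons s L' R n r rest hrs, if_neg (by omega : ¬ r ≤ s + 1)]
          refine ih (r :: rest) S (n - 1) hL' hR' ?_ hnotR' h3'
          intro x hx
          rcases List.mem_cons.mp hx with h | h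
          · exact h ▸ hrS
          · exact h1 x (hrestR x h).1

-- top level: the two sorted lists agree, and the initial state satisfies the invariant
theorem sorted_set_pairwise_lt (s : PySem.Set Int) (hs : s.Nodup) :
    (PySem.List.sorted s (fun x => x) false).Pairwise (· < ·) := by
  refine pairwise_lt_of_le_nodup _ (PySem.List.sorted_pairwise s (fun x => x)) ?_
  exact (PySem.List.sorted_perm s (fun x => x) false).nodup_iff.mpr hs

theorem solution_spec : Claim_equal_solution := by
  intro n lost reserve _
  unfold Spec_solution solution solution_alt
  simp only []
  set lostSet := PySem.Set.ofList lost with hls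
  set reserveSet := PySem.Set.ofList reserve with hrs
  set both := PySem.Set.inter lostSet reserveSet with hboth
  have hLperm : (PySem.Set.diff lostSet both).Perm (PySem.Set.diff lostSet reserveSet) := by
    refine (List.perm_ext_iff_of_nodup ?_ ?_).2 ?_
    · exact PySem.Set.nodup_diff _ _ (PySem.Set.nodup_ofList _)
    · exact PySem.Set.nodup_diff _ _ (PySem.Set.nodup_ofList _)
    · intro x
      simp only [PySem.Set.mem_diff, hboth, PySem.Set.mem_inter]
      tauto
  have hRperm : (PySem.Set.diff reserveSet both).Perm (PySem.Set.diff reserveSet lostSet) := by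
    refine (List.perm_ext_iff_of_nodup ?_ ?_).2 ?_
    · exact PySem.Set.nodup_diff _ _ (PySem.Set.nodup_ofList _)
    · exact PySem.Set.nodup_diff _ _ (PySem.Set.nodup_ofList _)
    · intro x
      simp only [PySem.Set.mem_diff, hboth, PySem.Set.mem_inter]
      tauto
  rw [PySem.List.sorted_eq_sorted_of_perm _ _ _ (fun a b h => h) hLperm]
  set L := PySem.List.sorted (PySem.Set.diff lostSet reserveSet) (fun x => x) false with hLdef
  set Rl := PySem.List.sorted (PySem.Set.diff reserveSet lostSet) (fun x => x) false with hRdef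
  refine main_inv L Rl (PySem.Set.diff reserveSet both) n ?_ ?_ ?_ ?_ ?_
  · exact sorted_set_pairwise_lt _ (PySem.Set.nodup_diff _ _ (PySem.Set.nodup_ofList _))
  · exact sorted_set_pairwise_lt _ (PySem.Set.nodup_diff _ _ (PySem.Set.nodup_ofList _))
  · intro x hx
    have : x ∈ PySem.Set.diff reserveSet lostSet :=
      (PySem.List.mem_sorted _ _ _ _).1 hx
    exact hRperm.mem_iff.2 this
  · intro x hx hxR
    exfalso
    apply hxR
    rw [hRdef, PySem.List.mem_sorted]
    exact hRperm.mem_iff.1 hx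
  · intro l hl hmem
    have hlL : l ∈ PySem.Set.diff lostSet reserveSet := (PySem.List.mem_sorted _ _ _ _).1 hl
    have hlS : l ∈ PySem.Set.diff reserveSet both := hmem
    rw [PySem.Set.mem_diff] at hlL hlS
    exact ((hlL.2) hlS.1)
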